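-- pv_equiv track=rewrite | github.com/j2noo/SJCE_Algorithm_Study | lujae/13주차/카드뭉치.py | checkNoWord
-- ===== SOURCE A (Python) =====
-- def checkNoWord(cardIdxOfGoal):
--     if -1 not in cardIdxOfGoal:
--         return True
--
--     firstNoWord = cardIdxOfGoal.index(-1)
--     lastNoWord = (len(cardIdxOfGoal) - 1) - cardIdxOfGoal[::-1].index(-1)
--
--     if lastNoWord != len(cardIdxOfGoal) - 1:
--         return False
--
--     for i in range(firstNoWord, lastNoWord + 1):
--         if cardIdxOfGoal[i] != -1:
--             return False
--
--     return True
-- ===== SOURCE B (Python) =====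
-- def checkNoWord(cardIdxOfGoal):
--     seen = False
--     for x in cardIdxOfGoal:
--         if x == -1:
--             seen = True
--         elif seen:
--             return False
--     return True
-- ===== Notes on version B (the rewrite author's own statement) =====
-- stated objective: simpler
-- what changed: Replaced A's multi-pass scheme (membership test, first index, reversed-list index, then a range loop re-checking elements) by a single forward pass maintaining a 'seen a -1' flag, never computing any index.
import Mathlib
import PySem

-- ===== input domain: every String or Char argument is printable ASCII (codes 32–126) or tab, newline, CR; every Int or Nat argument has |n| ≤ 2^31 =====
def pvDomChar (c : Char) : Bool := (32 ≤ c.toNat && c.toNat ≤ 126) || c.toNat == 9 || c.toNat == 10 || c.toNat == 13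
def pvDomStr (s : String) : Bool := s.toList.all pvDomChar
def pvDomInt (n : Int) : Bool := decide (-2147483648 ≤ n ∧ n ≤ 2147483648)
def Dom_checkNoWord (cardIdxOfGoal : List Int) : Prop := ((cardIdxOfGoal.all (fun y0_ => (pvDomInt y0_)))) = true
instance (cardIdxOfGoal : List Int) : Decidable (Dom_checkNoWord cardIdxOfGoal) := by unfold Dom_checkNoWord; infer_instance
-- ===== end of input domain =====

-- B replaces A's multi-pass index computations by a single forward flag-carrying pass (simpler).


-- ===== PORT A =====
-- 'cardIdxOfGoal[::-1]' is ported as '.reverse' (exact: PySem.List.slice?_none_none_neg_one).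
-- The two 'match … | none => true' arms guard the '.index(-1)' calls; they are unreachable
-- because they are only evaluated when -1 ∈ the list.
def checkNoWord (cardIdxOfGoal : List Int) : Bool :=
  if decide (¬ (-1 : Int) ∈ cardIdxOfGoal) then true
  else
    match PySem.List.index? cardIdxOfGoal (-1) with
    | none => true
    | some firstNoWord =>
      match PySem.List.index? cardIdxOfGoal.reverse (-1) with
      | none => true
      | some r =>
        let lastNoWord : Int := ((cardIdxOfGoal.length : Int) - 1) - (r : Int)
        if lastNoWord ≠ (cardIdxOfGoal.length : Int) - 1 then false
        else
          (PySem.List.pyRange (firstNoWord : Int) (lastNoWord + 1) 1).all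
            (fun i => PySem.List.pyGet? cardIdxOfGoal i == some (-1))

-- ===== PORT B =====
-- single forward pass; 'seen' = have we met a -1 yet; early False on a non -1 after it
def cnwGo : List Int → Bool → Bool
  | [], _ => true
  | x :: rest, seen =>
    if x = -1 then cnwGo rest true
    else if seen then false
    else cnwGo rest false

def checkNoWord_alt (cardIdxOfGoal : List Int) : Bool := cnwGo cardIdxOfGoal false

-- ===== PRECONDITION & SPEC =====
def Spec_checkNoWord (cardIdxOfGoal : List Int) (out : Bool) : Prop := out = checkNoWord_alt cardIdxOfGoal
instance (cardIdxOfGoal : List Int) (out : Bool) : Decidable (Spec_checkNoWord cardIdxOfGoal out) := by unfold Spec_checkNoWord; infer_instance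

-- ===== CLAIM (what is proved, stated in full; the proofs are below) =====
def Claim_equal_checkNoWord : Prop := ∀ (cardIdxOfGoal : List Int), Dom_checkNoWord cardIdxOfGoal → Spec_checkNoWord cardIdxOfGoal (checkNoWord cardIdxOfGoal)

-- ===== LEMMAS AND PROOFS =====

-- B with the flag set checks that every remaining element is -1
theorem cnwGo_true (xs : List Int) : cnwGo xs true = xs.all (fun x => x == -1) := by
  induction xs with
  | nil => rfl
  | cons x rest ih =>
    by_cases h : x = -1 <;> simp [cnwGo, h, ih]

-- B equals: all elements from the first -1 on are -1
theorem cnwGo_false (xs : List Int) :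
    cnwGo xs false = (xs.dropWhile (fun x => !(x == -1))).all (fun x => x == -1) := by
  induction xs with
  | nil => rfl
  | cons x rest ih =>
    by_cases h : x = -1
    · simp [cnwGo, h, List.dropWhile, cnwGo_true]
    · simp [cnwGo, h, ih]

theorem dropWhile_eq_nil_of_not_mem (xs : List Int) (h : (-1 : Int) ∉ xs) :
    xs.dropWhile (fun x => !(x == -1)) = [] := by
  induction xs with
  | nil => rfl
  | cons x rest ih =>
    simp only [List.mem_cons, not_or] at h
    simp [Ne.symm h.1, ih h.2]

-- dropWhile at the first -1: everything up to it is dropped, nothing more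
theorem dropWhile_first (pre suf : List Int) (h : (-1 : Int) ∉ pre) :
    (pre ++ (-1 : Int) :: suf).dropWhile (fun x => !(x == -1)) = -1 :: suf := by
  induction pre with
  | nil => simp
  | cons x rest ih =>
    simp only [List.mem_cons, not_or] at h
    simp [Ne.symm h.1, ih h.2]

-- the range loop of A over [k, len) checks exactly the suffix xs.drop k
theorem range_all_aux (xs : List Int) :
    ∀ (d k : Nat), xs.length - k = d →
      ((PySem.List.pyRange (k : Int) (xs.length : Int) 1).all
          (fun i => PySem.List.pyGet? xs i == some (-1)))
        = (xs.drop k).all (fun x => x == -1) := by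
  intro d
  induction d with
  | zero =>
    intro k hd
    have hlen : xs.length ≤ k := by omega
    rw [PySem.List.pyRange_one_eq_nil (by exact_mod_cast hlen), List.drop_eq_nil_of_le hlen]
    rfl
  | succ d ih =>
    intro k hd
    have hklt : k < xs.length := by omega
    rw [PySem.List.pyRange_one_cons (by exact_mod_cast hklt)]
    have h1 : ((k : Int) + 1) = ((k + 1 : Nat) : Int) := by push_cast; ring
    rw [h1, List.drop_eq_getElem_cons hklt]
    simp only [List.all_cons, ih (k + 1) (by omega), PySem.List.pyGet?_natCast,
      List.getElem?_eq_getElem hklt]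
    rfl

theorem checkNoWord_spec : Claim_equal_checkNoWord := by
  intro xs _
  unfold Spec_checkNoWord checkNoWord_alt
  rw [cnwGo_false]
  by_cases hmem : (-1 : Int) ∈ xs
  · -- -1 occurs in the list
    obtain ⟨k, hk⟩ := Option.isSome_iff_exists.mp ((PySem.List.index?_isSome_iff _ _).mpr hmem)
    have hmemrev : (-1 : Int) ∈ xs.reverse := by simpa using hmem
    obtain ⟨r, hr⟩ := Option.isSome_iff_exists.mp ((PySem.List.index?_isSome_iff _ _).mpr hmemrev)
    obtain ⟨pre, suf, hsplit, hlenpre, hpre⟩ := (PySem.List.index?_eq_some_iff _ _ _).mp hr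
    have hxs : xs = suf.reverse ++ (-1 : Int) :: pre.reverse := by
      have := congrArg List.reverse hsplit
      simpa using this
    simp only [checkNoWord, hmem, not_true_eq_false, decide_false, Bool.false_eq_true,
      if_false, hk, hr]
    by_cases hr0 : r = 0
    · -- last element is -1: A runs its range loop
      subst hr0
      have hpreNil : pre = [] := List.eq_nil_of_length_eq_zero hlenpre
      rw [if_neg (by push_cast; omega)]
      have hup : ((xs.length : Int) - 1 - ((0 : Nat) : Int) + 1) = (xs.length : Int) := by
        push_cast; ring
      rw [hup, range_all_aux xs (xs.length - k) k rfl]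
      obtain ⟨pre2, suf2, hsplit2, hlen2, hpre2⟩ := (PySem.List.index?_eq_some_iff _ _ _).mp hk
      rw [hsplit2, dropWhile_first pre2 suf2 hpre2, ← hlen2, List.drop_left]
    · -- last element is not -1: both sides are false
      rw [if_pos (by omega)]
      obtain ⟨p0, pre', rfl⟩ := List.exists_cons_of_ne_nil
        (l := pre) (by intro h; exact hr0 (by simp [← hlenpre, h]))
      have hp0 : p0 ≠ -1 := by
        intro h; exact hpre (by simp [h])
      have hne : xs.dropWhile (fun x => !(x == -1)) ≠ [] := by
        intro h
        rw [List.dropWhile_eq_nil_iff] at h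
        exact absurd (h (-1) hmem) (by simp)
      have hsuffix : xs.dropWhile (fun x => !(x == -1)) <:+ xs :=
        List.dropWhile_suffix _
      obtain ⟨t, ht⟩ := hsuffix
      have hlast : (xs.dropWhile (fun x => !(x == -1))).getLast? = some p0 := by
        have h1 : xs.getLast? = some p0 := by
          rw [hxs]
          rw [List.getLast?_append_of_ne_nil _ (by simp)]
          rw [show (-1 : Int) :: (p0 :: pre').reverse
              = ((-1 : Int) :: pre'.reverse) ++ [p0] by simp, List.getLast?_concat]
        have h2 : xs.getLast? = (xs.dropWhile (fun x => !(x == -1))).getLast? := by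
          conv_lhs => rw [← ht]
          rw [List.getLast?_append_of_ne_nil _ hne]
        rw [← h2, h1]
      have hp0mem : p0 ∈ xs.dropWhile (fun x => !(x == -1)) :=
        List.mem_of_getLast? hlast
      symm
      rw [List.all_eq_false]
      exact ⟨p0, hp0mem, by simp [hp0]⟩
  · -- no -1 at all: both sides are true
    simp [checkNoWord, hmem, dropWhile_eq_nil_of_not_mem xs hmem]
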